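-- pv_equiv track=rewrite | github.com/Anshu989856/IITJ-CC-WEB-AGENT | CODES/chunked.py | merge_cluster_sentences
-- ===== SOURCE A (Python) =====
-- def merge_cluster_sentences(sentences, labels):
--     """
--     Merge sentences belonging to the same cluster in the original order.
--     Returns a dictionary mapping clusters to merged content.
--     """
--     cluster_map = {}
--     for idx, label in enumerate(labels):
--         if label not in cluster_map:
--             cluster_map[label] = []
--         cluster_map[label].append((idx, sentences[idx]))
--
--     merged = {}
--     for label, items in cluster_map.items():
--         # Sort sentences by original order to maintain context
--         sorted_items = [s for idx, s in sorted(items, key=lambda x: x[0])]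
--         merged[label] = " ".join(sorted_items)
--     return merged
-- ===== SOURCE B (Python) =====
-- def merge_cluster_sentences(sentences, labels):
--     """Merge sentences belonging to the same cluster in the original order."""
--     merged = {}
--     for label in dict.fromkeys(labels):
--         merged[label] = " ".join(sentences[i] for i, l in enumerate(labels) if l == label)
--     return merged
-- ===== Notes on version B (the rewrite author's own statement) =====
-- stated objective: simpler
-- what changed: Replaces the grouping dict of (index, sentence) pairs plus a per-cluster sort with a direct rescan: for each label in first-appearance order (dict.fromkeys), join the matching sentences straight from one enumerate pass, maintaining no intermediate index.
import Mathlib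
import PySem

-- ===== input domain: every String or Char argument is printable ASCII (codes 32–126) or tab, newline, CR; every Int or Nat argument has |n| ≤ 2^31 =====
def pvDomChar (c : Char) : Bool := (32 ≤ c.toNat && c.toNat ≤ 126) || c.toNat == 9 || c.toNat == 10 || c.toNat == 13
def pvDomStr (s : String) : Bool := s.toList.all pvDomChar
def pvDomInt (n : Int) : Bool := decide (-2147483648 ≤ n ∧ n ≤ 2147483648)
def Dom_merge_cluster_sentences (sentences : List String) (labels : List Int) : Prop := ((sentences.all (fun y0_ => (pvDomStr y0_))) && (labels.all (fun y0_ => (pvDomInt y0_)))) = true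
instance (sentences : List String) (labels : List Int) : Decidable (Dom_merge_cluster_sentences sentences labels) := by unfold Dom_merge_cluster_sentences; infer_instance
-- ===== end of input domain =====

-- B replaces A's grouping dict of (index, sentence) pairs + per-cluster sort with a direct
-- rescan per first-appearance label (objective: simpler; same return value on Pre_).

-- ===== PORT A =====
def merge_cluster_sentences (sentences : List String) (labels : List Int) : List (Int × String) :=
  let cluster_map : PySem.Dict Int (List (Int × String)) :=
    (PySem.List.enumerate labels 0).foldl
      (fun d p =>
        -- if label not in cluster_map: cluster_map[label] = []
        let d1 := if d.contains p.2 then d else d.insert p.2 []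
        -- cluster_map[label].append((idx, sentences[idx]))
        d1.insert p.2 (d1.getD p.2 [] ++ [(p.1, (PySem.List.pyGet? sentences p.1).getD "")]))
      PySem.Dict.empty
  let merged : PySem.Dict Int String :=
    cluster_map.items.foldl
      (fun m q =>
        m.insert q.1 (PySem.Str.join " "
          ((PySem.List.sorted q.2 (fun x => x.1) false).map (fun x => x.2))))
      PySem.Dict.empty
  merged.items

-- ===== PORT B =====
def merge_cluster_sentences_alt (sentences : List String) (labels : List Int) : List (Int × String) :=
  (PySem.List.dedup labels).map (fun label =>
    (label, PySem.Str.join " "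
      ((PySem.List.enumerate labels 0).filterMap
        (fun p => if p.2 == label then some ((PySem.List.pyGet? sentences p.1).getD "") else none))))

-- ===== PRECONDITION & SPEC =====
-- Pre_ excludes exactly the inputs where Python raises IndexError: some index below len(labels)
-- is out of range for sentences (both A and B index sentences[idx] for every idx < len(labels)).
def Pre_merge_cluster_sentences (sentences : List String) (labels : List Int) : Prop :=
  labels.length ≤ sentences.length
instance (sentences : List String) (labels : List Int) : Decidable (Pre_merge_cluster_sentences sentences labels) := by unfold Pre_merge_cluster_sentences; infer_instance

def pvWitness_merge_cluster_sentences : List String × List Int := (["a b", "c"], [1, 0])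

def Spec_merge_cluster_sentences (sentences : List String) (labels : List Int) (out : List (Int × String)) : Prop := out = merge_cluster_sentences_alt sentences labels
instance (sentences : List String) (labels : List Int) (out : List (Int × String)) : Decidable (Spec_merge_cluster_sentences sentences labels out) := by unfold Spec_merge_cluster_sentences; infer_instance

-- ===== CLAIM (what is proved, stated in full; the proofs are below) =====
def Claim_equal_merge_cluster_sentences : Prop := ∀ (sentences : List String) (labels : List Int), Dom_merge_cluster_sentences sentences labels → Pre_merge_cluster_sentences sentences labels → Spec_merge_cluster_sentences sentences labels (merge_cluster_sentences sentences labels)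

-- ===== LEMMAS AND PROOFS =====

-- A's "ensure key then append" step is one dict modify.
theorem ensure_append_eq_modify (d : PySem.Dict Int (List (Int × String))) (k : Int)
    (x : Int × String) :
    (let d1 := if d.contains k then d else d.insert k []
     d1.insert k (d1.getD k [] ++ [x])) = d.modify k [] (fun ys => ys ++ [x]) := by
  by_cases h : d.contains k = true
  · simp only [h, if_true]
    exact PySem.Dict.ext_iff.mpr rfl
  · simp only [Bool.not_eq_true] at h
    simp only [h, if_false, Bool.false_eq_true]
    rw [PySem.Dict.getD_insert_self, PySem.Dict.insert_insert_self]
    have h2 : d.modify k [] (fun ys => ys ++ [x]) = d.insert k (d.getD k [] ++ [x]) :=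
      PySem.Dict.ext_iff.mpr rfl
    rw [h2]
    simp [h, pysem]

-- filterMap of an if-guard is filter-then-map
theorem filterMap_ite {α β : Type} (q : α → Bool) (f : α → β) (l : List α) :
    l.filterMap (fun a => if q a then some (f a) else none) = (l.filter q).map f := by
  induction l with
  | nil => rfl
  | cons a l ih =>
    by_cases h : q a = true <;> simp [h, ih]

set_option maxHeartbeats 2000000 in
theorem merge_cluster_sentences_spec' (sentences : List String) (labels : List Int) :
    merge_cluster_sentences sentences labels = merge_cluster_sentences_alt sentences labels := by
  unfold merge_cluster_sentences merge_cluster_sentences_alt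
  simp only [ensure_append_eq_modify]
  set sent : Int → String := fun i => (PySem.List.pyGet? sentences i).getD "" with hsent
  set l : List (Int × Int) := PySem.List.enumerate labels 0 with hl
  -- re-key the grouping fold by the first component
  have hfold :
      l.foldl (fun d p => d.modify p.2 [] (fun ys => ys ++ [(p.1, sent p.1)])) PySem.Dict.empty
        = (l.map (fun p => (p.2, (p.1, sent p.1)))).foldl
            (fun d q => d.modify q.1 [] (fun ys => ys ++ [q.2])) PySem.Dict.empty := by
    rw [List.foldl_map]
  rw [hfold]
  set l' : List (Int × (Int × String)) := l.map (fun p => (p.2, (p.1, sent p.1))) with hl'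
  set d : PySem.Dict Int (List (Int × String)) :=
    l'.foldl (fun d q => d.modify q.1 [] (fun ys => ys ++ [q.2])) PySem.Dict.empty with hd
  have hnodup : d.keys.Nodup := by
    rw [hd]
    exact PySem.Dict.nodup_keys_foldl_modify_key l' (fun q => q.1) [] (fun _ q => fun ys => ys ++ [q.2])
      PySem.Dict.empty (by simp [pysem])
  have hkeys : d.keys = PySem.List.dedup labels := by
    rw [hd, PySem.Dict.keys_foldl_modify_key]
    have h1 : List.map (fun (q : Int × (Int × String)) => q.1) l' = labels := by
      simp only [hl', List.map_map]
      exact PySem.List.map_snd_enumerate labels 0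
    rw [h1]
    simp [pysem]
  have hget : ∀ k : Int, d.getD k [] =
      (l.filter (fun p => p.2 == k)).map (fun p => (p.1, sent p.1)) := by
    intro k
    rw [hd, PySem.Dict.getD_foldl_modify_append]
    simp only [hl', List.filter_map, List.map_map]
    rfl
  -- second loop over items with fresh distinct keys appends
  have hitems2 : ∀ (g : List (Int × String) → String),
      (d.items.foldl (fun m q => m.insert q.1 (g q.2)) PySem.Dict.empty).items
        = d.items.map (fun q => (q.1, g q.2)) := by
    intro g
    have := PySem.Dict.items_foldl_insert_fresh (l := d.items) (k := fun q => q.1)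
      (v := fun q => g q.2) (d := PySem.Dict.empty)
      (by intro a _; simp [pysem]) (by simpa using hnodup)
    simpa using this
  refine Eq.trans (hitems2 (fun ys => PySem.Str.join " "
      ((PySem.List.sorted ys (fun x => x.1) false).map (fun x => x.2)))) ?_
  have hitems : d.items = d.keys.map (fun k => (k, d.getD k [])) :=
    PySem.Dict.items_eq_map_keys d hnodup []
  rw [hitems, hkeys, List.map_map]
  refine List.map_congr_left ?_
  intro k _
  simp only [Function.comp]
  congr 1
  -- per-key: sorted is the identity on the already index-ordered group
  have hpair : ((l.filter (fun p => p.2 == k)).map (fun p => (p.1, sent p.1))).Pairwise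
      (fun a b => a.1 ≤ b.1) := by
    refine (List.pairwise_map.mpr ?_)
    refine List.Pairwise.imp (fun h => le_of_lt h) ?_
    exact ((PySem.List.pairwise_lt_enumerate labels 0).sublist List.filter_sublist)
  rw [hget k, PySem.List.sorted_eq_self_of_pairwise _ _ hpair, filterMap_ite, List.map_map]
  rfl

-- ===== VERDICT (by name: the statement is the Claim_ definition above) =====
theorem merge_cluster_sentences_spec : Claim_equal_merge_cluster_sentences := by
  intro sentences labels _ _
  exact merge_cluster_sentences_spec' sentences labels
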